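-- pv_equiv track=rewrite | github.com/Alessio76184/Assesment-test | main_functions.py | return_characters_appearing_twice
-- ===== SOURCE A (Python) =====
-- def return_characters_appearing_twice(chars: list[str]) -> list[str]:
--     """
--     An algorithm that given a string of characters, for example {'c','a','i','o','p','a'},
--     will print out the list of characters appearing at least 2 times.
--     In this specific example, it would return {'a'}.
--     """
--     freq = {}
--     for ch in chars:
--         freq[ch] = freq.get(ch, 0) + 1
--
--     seen = set()
--     result = []
--     for ch in chars:
--         if ch not in seen and freq[ch] >= 2:
--             result.append(ch)
--             seen.add(ch)
--     return result
-- ===== SOURCE B (Python) =====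
-- def return_characters_appearing_twice(chars: list[str]) -> list[str]:
--     freq = {}
--     for ch in chars:
--         freq[ch] = freq.get(ch, 0) + 1
--     return [c for c, n in freq.items() if n >= 2]
-- ===== Notes on version B (the rewrite author's own statement) =====
-- stated objective: simpler
-- what changed: B drops A's separate seen-set and second scan over the input list: after the one counting pass it builds the result directly from the dict's items in insertion order, which already gives first-occurrence order and deduplication.
import Mathlib
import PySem

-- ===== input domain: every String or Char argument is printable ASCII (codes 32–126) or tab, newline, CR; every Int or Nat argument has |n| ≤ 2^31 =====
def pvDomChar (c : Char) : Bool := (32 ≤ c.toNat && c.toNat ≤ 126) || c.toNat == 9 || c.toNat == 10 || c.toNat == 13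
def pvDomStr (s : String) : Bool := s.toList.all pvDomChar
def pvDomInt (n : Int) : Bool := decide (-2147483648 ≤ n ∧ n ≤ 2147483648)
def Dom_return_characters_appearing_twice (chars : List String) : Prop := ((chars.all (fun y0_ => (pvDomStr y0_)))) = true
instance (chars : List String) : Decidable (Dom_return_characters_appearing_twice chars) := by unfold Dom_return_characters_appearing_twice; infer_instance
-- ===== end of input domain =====

-- B replaces A's seen-set and second scan of the input list by reading the result off the
-- counting dict's items in insertion order (objective: simpler).

-- ===== PORT A =====
def return_characters_appearing_twice (chars : List String) : List String :=
  -- freq = {}; for ch in chars: freq[ch] = freq.get(ch, 0) + 1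
  let freq : PySem.Dict String Int :=
    chars.foldl (fun d ch => d.insert ch (d.getD ch 0 + 1)) PySem.Dict.empty
  -- seen = set(); result = []; for ch in chars: if ch not in seen and freq[ch] >= 2: …
  -- freq[ch]: ch is always a key of freq here, so getD is exact
  (chars.foldl
    (fun (st : PySem.Set String × List String) ch =>
      if !(PySem.Set.contains st.1 ch) && decide (2 ≤ freq.getD ch 0) then
        (PySem.Set.add st.1 ch, st.2 ++ [ch])
      else st)
    (PySem.Set.empty, [])).2

-- ===== PORT B =====
def return_characters_appearing_twice_alt (chars : List String) : List String :=
  let freq : PySem.Dict String Int :=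
    chars.foldl (fun d ch => d.insert ch (d.getD ch 0 + 1)) PySem.Dict.empty
  -- [c for c, n in freq.items() if n >= 2]
  freq.items.filterMap (fun p => if 2 ≤ p.2 then some p.1 else none)

-- ===== PRECONDITION & SPEC =====
def Spec_return_characters_appearing_twice (chars : List String) (out : List String) : Prop := out = return_characters_appearing_twice_alt chars
instance (chars : List String) (out : List String) : Decidable (Spec_return_characters_appearing_twice chars out) := by unfold Spec_return_characters_appearing_twice; infer_instance

-- ===== CLAIM (what is proved, stated in full; the proofs are below) =====
def Claim_equal_return_characters_appearing_twice : Prop := ∀ (chars : List String), Dom_return_characters_appearing_twice chars → Spec_return_characters_appearing_twice chars (return_characters_appearing_twice chars)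

-- ===== LEMMAS AND PROOFS =====

-- A's second loop, as a structural recursion on the remaining input
def goA (P : String → Bool) (seen : PySem.Set String) : List String → List String
  | [] => []
  | ch :: t =>
    if !(PySem.Set.contains seen ch) && P ch then ch :: goA P (seen.add ch) t
    else goA P seen t

theorem foldl_eq_goA (P : String → Bool) (l : List String)
    (seen : PySem.Set String) (acc : List String) :
    (l.foldl
      (fun (st : PySem.Set String × List String) ch =>
        if !(PySem.Set.contains st.1 ch) && P ch then (PySem.Set.add st.1 ch, st.2 ++ [ch]) else st)
      (seen, acc)).2 = acc ++ goA P seen l := by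
  induction l generalizing seen acc with
  | nil => simp [goA]
  | cons ch t ih =>
    simp only [List.foldl_cons, goA]
    by_cases h : (!(PySem.Set.contains seen ch) && P ch) = true
    · simp only [h, if_true, ih]
      simp
    · simp only [Bool.not_eq_true] at h
      simp only [h, Bool.false_eq_true, if_false, ih]

theorem contains_add_eq (s : PySem.Set String) (x y : String) :
    PySem.Set.contains (PySem.Set.add s x) y = (PySem.Set.contains s y || y == x) := by
  by_cases hm : x ∈ s
  · rw [PySem.Set.add_of_mem hm]
    by_cases hy : y = x
    · subst hy
      simp [PySem.Set.contains_eq_listContains, hm]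
    · simp [hy]
  · rw [PySem.Set.add_of_not_mem hm]
    by_cases hy : y = x
    · subst hy; simp [PySem.Set.contains_eq_listContains]
    · simp [PySem.Set.contains_eq_listContains, hy]

theorem goA_eq_filter (P : String → Bool) (l : List String) (seen : PySem.Set String) :
    goA P seen l
      = (PySem.Set.ofList l).filter (fun c => !(PySem.Set.contains seen c) && P c) := by
  induction l generalizing seen with
  | nil => simp [goA, PySem.Set.ofList_nil]
  | cons ch t ih =>
    rw [PySem.Set.ofList_cons]
    have hd : PySem.Set.discard (PySem.Set.ofList t) ch
        = (PySem.Set.ofList t).filter (fun y => !(y == ch)) := rfl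
    by_cases h : (!(PySem.Set.contains seen ch) && P ch) = true
    · simp only [goA, h, if_true, List.filter_cons, ih, hd, List.filter_filter]
      congr 1
      apply List.filter_congr
      intro c _
      rw [contains_add_eq]
      by_cases hc : c = ch
      · subst hc; simp
      · simp [beq_iff_eq, hc, Bool.and_comm, Bool.and_left_comm]
    · simp only [Bool.not_eq_true] at h
      simp only [goA, h, Bool.false_eq_true, if_false, List.filter_cons, h, ih, hd,
        List.filter_filter]
      apply List.filter_congr
      intro c _
      by_cases hc : c = ch
      · subst hc
        rw [h, Bool.false_and]
      · simp [hc]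

theorem filterMap_guard_eq_filter (P : String → Bool) (l : List String) :
    l.filterMap (fun c => if P c then some c else none) = l.filter P := by
  induction l with
  | nil => rfl
  | cons x t ih =>
    by_cases h : P x = true
    · simp [h, ih]
    · simp [h, ih]

-- ===== VERDICT (by name: the statement is the Claim_ definition above) =====
theorem return_characters_appearing_twice_spec : Claim_equal_return_characters_appearing_twice := by
  intro chars _
  show (chars.foldl
      (fun (st : PySem.Set String × List String) ch =>
        if !(PySem.Set.contains st.1 ch) && decide (2 ≤ (PySem.Dict.counter chars).getD ch 0) then
          (PySem.Set.add st.1 ch, st.2 ++ [ch])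
        else st)
      (PySem.Set.empty, [])).2
    = (PySem.Dict.counter chars).items.filterMap (fun p => if 2 ≤ p.2 then some p.1 else none)
  rw [foldl_eq_goA, List.nil_append, goA_eq_filter]
  rw [PySem.Dict.items_counter, List.filterMap_map]
  have : ∀ c : String,
      ((fun p : String × Int => if 2 ≤ p.2 then some p.1 else none) ∘
        (fun k => (k, (chars.count k : Int)))) c
      = (fun c => if decide (2 ≤ ((PySem.Dict.counter chars).getD c 0)) then some c else none) c := by
    intro c
    simp [PySem.Dict.getD_counter]
  rw [funext this, filterMap_guard_eq_filter]
  apply List.filter_congr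
  intro c _
  simp [PySem.Set.contains_eq_listContains, PySem.Set.empty]
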